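-- pv_equiv track=rewrite | github.com/JebUser/Python-Proyects | tarea4 (1).py | completarcarrera
-- ===== SOURCE A (Python) =====
-- def completarcarrera(estaciones, gasolinadis, gasrequerida):
--     distmenor = []
--     i = 0
--     while i < estaciones:
--         tanque = 0
--         j = i
--         estacionesdisp = []
--         while j < estaciones:
--             tanque -= gasrequerida[j]
--             if (tanque + gasolinadis[j]) > 0:
--                 estacionesdisp.append(int(j+1))
--             else:
--                 tanque = 0
--             j +=1
--         if estacionesdisp != []:
--             distmenor.append(estacionesdisp[0])
--         i +=1
--     if distmenor == []:
--         return "Not possible"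
--     else:
--         return "Possible from station " + str(distmenor[0])
-- ===== SOURCE B (Python) =====
-- def completarcarrera(estaciones, gasolinadis, gasrequerida):
--     # Single pass: the race is completable from the first station j where the
--     # available gas exceeds the required gas (tank resets on every failure in A,
--     # so A's answer is exactly this first index + 1).
--     for j in range(estaciones):
--         if gasolinadis[j] > gasrequerida[j]:
--             return "Possible from station " + str(j + 1)
--     return "Not possible"
-- ===== Notes on version B (the rewrite author's own statement) =====
-- stated objective: faster
-- what changed: Replaced A's quadratic double while-loop (restart scan from every station) with one linear scan returning the first station whose available gas exceeds the required gas, which equals A's answer since A's tank resets on every failure.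
import Mathlib
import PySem

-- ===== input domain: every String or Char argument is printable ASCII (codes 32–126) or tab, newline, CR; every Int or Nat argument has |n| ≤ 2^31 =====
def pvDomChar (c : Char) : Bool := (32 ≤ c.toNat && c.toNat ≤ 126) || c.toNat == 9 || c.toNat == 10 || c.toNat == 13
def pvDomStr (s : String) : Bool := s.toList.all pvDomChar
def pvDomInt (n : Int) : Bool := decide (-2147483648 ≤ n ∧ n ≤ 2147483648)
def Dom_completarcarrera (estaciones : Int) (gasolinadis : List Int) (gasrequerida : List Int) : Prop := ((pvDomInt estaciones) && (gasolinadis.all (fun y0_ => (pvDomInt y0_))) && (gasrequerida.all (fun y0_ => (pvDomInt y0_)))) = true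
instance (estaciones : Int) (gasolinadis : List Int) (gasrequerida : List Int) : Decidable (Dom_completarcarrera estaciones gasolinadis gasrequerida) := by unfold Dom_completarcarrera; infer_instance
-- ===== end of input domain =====

-- B replaces A's quadratic double while-loop by one linear scan for the first station
-- whose available gas exceeds the required gas (objective: faster, O(n^2) loop pair -> one O(n) scan).

-- ===== PORT A =====
-- inner while loop: j from its current value while j < estaciones; builds estacionesdisp
-- (cons-forward recursion builds the same list A's append-at-end loop builds)
def pvInnerA (estaciones : Int) (gasolinadis : List Int) (gasrequerida : List Int)
    (j tanque : Int) : Nat → List Int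
  | 0 => []
  | fuel + 1 =>
    if j < estaciones then
      let t := tanque - PySem.List.pyGetD gasrequerida j 0
      if t + PySem.List.pyGetD gasolinadis j 0 > 0 then
        (j + 1) :: pvInnerA estaciones gasolinadis gasrequerida (j + 1) t fuel
      else
        pvInnerA estaciones gasolinadis gasrequerida (j + 1) 0 fuel
    else []

-- outer while loop: i from 0 while i < estaciones; builds distmenor
def pvOuterA (estaciones : Int) (gasolinadis : List Int) (gasrequerida : List Int)
    (i : Int) : Nat → List Int
  | 0 => []
  | fuel + 1 =>
    if i < estaciones then
      match pvInnerA estaciones gasolinadis gasrequerida i 0 ((estaciones - i).toNat) with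
      | [] => pvOuterA estaciones gasolinadis gasrequerida (i + 1) fuel
      | h :: _ => h :: pvOuterA estaciones gasolinadis gasrequerida (i + 1) fuel
    else []

def completarcarrera (estaciones : Int) (gasolinadis : List Int) (gasrequerida : List Int) : String :=
  match pvOuterA estaciones gasolinadis gasrequerida 0 estaciones.toNat with
  | [] => "Not possible"
  | h :: _ => "Possible from station " ++ PySem.Int.toStr h

-- ===== PORT B =====
-- for j in range(estaciones): early return on the first j with gasolinadis[j] > gasrequerida[j]
def pvLoopB (gasolinadis : List Int) (gasrequerida : List Int) : List Int → Option Int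
  | [] => none
  | j :: rest =>
    if PySem.List.pyGetD gasolinadis j 0 > PySem.List.pyGetD gasrequerida j 0 then some (j + 1)
    else pvLoopB gasolinadis gasrequerida rest

def completarcarrera_alt (estaciones : Int) (gasolinadis : List Int) (gasrequerida : List Int) : String :=
  match pvLoopB gasolinadis gasrequerida (PySem.List.pyRange 0 estaciones 1) with
  | some h => "Possible from station " ++ PySem.Int.toStr h
  | none => "Not possible"

-- ===== PRECONDITION & SPEC =====
-- Pre_ excludes exactly the inputs where Python A raises IndexError: stations beyond the
-- ends of the gas lists are read whenever estaciones exceeds either length.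
def Pre_completarcarrera (estaciones : Int) (gasolinadis : List Int) (gasrequerida : List Int) : Prop :=
  estaciones ≤ gasolinadis.length ∧ estaciones ≤ gasrequerida.length
instance (estaciones : Int) (gasolinadis : List Int) (gasrequerida : List Int) : Decidable (Pre_completarcarrera estaciones gasolinadis gasrequerida) := by unfold Pre_completarcarrera; infer_instance

def pvWitness_completarcarrera : Int × List Int × List Int := (3, [1, 4, 2], [2, 1, 2])

def Spec_completarcarrera (estaciones : Int) (gasolinadis : List Int) (gasrequerida : List Int) (out : String) : Prop := out = completarcarrera_alt estaciones gasolinadis gasrequerida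
instance (estaciones : Int) (gasolinadis : List Int) (gasrequerida : List Int) (out : String) : Decidable (Spec_completarcarrera estaciones gasolinadis gasrequerida out) := by unfold Spec_completarcarrera; infer_instance

-- ===== CLAIM (what is proved, stated in full; the proofs are below) =====
def Claim_equal_completarcarrera : Prop := ∀ (estaciones : Int) (gasolinadis : List Int) (gasrequerida : List Int), Dom_completarcarrera estaciones gasolinadis gasrequerida → Pre_completarcarrera estaciones gasolinadis gasrequerida → Spec_completarcarrera estaciones gasolinadis gasrequerida (completarcarrera estaciones gasolinadis gasrequerida)

-- ===== LEMMAS AND PROOFS =====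

-- head of A's inner list (tank starts at 0): the first j' in [j, estaciones) with gas > required
lemma pvInnerA_head (estaciones : Int) (gd gr : List Int) :
    ∀ (fuel : Nat) (j : Int), (estaciones - j).toNat ≤ fuel →
      (pvInnerA estaciones gd gr j 0 fuel).head? =
        pvLoopB gd gr (PySem.List.pyRange j estaciones 1) := by
  intro fuel
  induction fuel with
  | zero =>
    intro j hf
    have hj : estaciones ≤ j := by omega
    rw [PySem.List.pyRange_one_eq_nil hj]
    simp [pvInnerA, pvLoopB]
  | succ f ih =>
    intro j hf
    by_cases hj : j < estaciones
    · rw [PySem.List.pyRange_one_cons hj]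
      simp only [pvInnerA, pvLoopB, if_pos hj]
      by_cases hc : 0 - PySem.List.pyGetD gr j 0 + PySem.List.pyGetD gd j 0 > 0
      · have hc' : PySem.List.pyGetD gd j 0 > PySem.List.pyGetD gr j 0 := by omega
        simp [hc']
      · have hc' : ¬ PySem.List.pyGetD gd j 0 > PySem.List.pyGetD gr j 0 := by omega
        simp only [hc, if_false, hc']
        exact ih (j + 1) (by omega)
    · have hj' : estaciones ≤ j := by omega
      rw [PySem.List.pyRange_one_eq_nil hj']
      simp [pvInnerA, pvLoopB, hj]

-- if the scan from j yields nothing, the scan from j+1 yields nothing either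
lemma pvLoopB_none_step (estaciones : Int) (gd gr : List Int) (j : Int) (hj : j < estaciones)
    (h : pvLoopB gd gr (PySem.List.pyRange j estaciones 1) = none) :
    pvLoopB gd gr (PySem.List.pyRange (j + 1) estaciones 1) = none := by
  rw [PySem.List.pyRange_one_cons hj] at h
  simp only [pvLoopB] at h
  split at h
  · exact absurd h (by simp)
  · exact h

-- head of A's outer list: the scan starting at i
lemma pvOuterA_head (estaciones : Int) (gd gr : List Int) :
    ∀ (fuel : Nat) (i : Int), (estaciones - i).toNat ≤ fuel →
      (pvOuterA estaciones gd gr i fuel).head? =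
        pvLoopB gd gr (PySem.List.pyRange i estaciones 1) := by
  intro fuel
  induction fuel with
  | zero =>
    intro i hf
    have hi : estaciones ≤ i := by omega
    rw [PySem.List.pyRange_one_eq_nil hi]
    simp [pvOuterA, pvLoopB]
  | succ f ih =>
    intro i hf
    by_cases hi : i < estaciones
    · simp only [pvOuterA, if_pos hi]
      have hin := pvInnerA_head estaciones gd gr ((estaciones - i).toNat) i (le_refl _)
      match hI : pvInnerA estaciones gd gr i 0 ((estaciones - i).toNat) with
      | [] =>
        rw [hI] at hin
        simp only [List.head?] at hin
        rw [ih (i + 1) (by omega), pvLoopB_none_step estaciones gd gr i hi hin.symm, hin]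
      | h :: _ =>
        rw [hI] at hin
        simp only [List.head?] at hin ⊢
        exact hin
    · have hi' : estaciones ≤ i := by omega
      rw [PySem.List.pyRange_one_eq_nil hi']
      simp [pvOuterA, hi, pvLoopB]

-- ===== VERDICT (by name: the statement is the Claim_ definition above) =====
theorem completarcarrera_spec : Claim_equal_completarcarrera := by
  intro estaciones gd gr _ _
  unfold Spec_completarcarrera completarcarrera completarcarrera_alt
  have h := pvOuterA_head estaciones gd gr estaciones.toNat 0 (by omega)
  match hO : pvOuterA estaciones gd gr 0 estaciones.toNat with
  | [] =>
    rw [hO] at h; simp only [List.head?] at h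
    rw [← h]
  | x :: _ =>
    rw [hO] at h; simp only [List.head?] at h
    rw [← h]
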